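-- pv_equiv track=rewrite | github.com/Fixx910/Sudoku-con-Algoritmo-Genetico | sudokuGeneradorSoluciones.py | contarRepetidos
-- ===== SOURCE A (Python) =====
-- def contarRepetidos(lista):
--     """ Cuenta los números repetidos en una lista de 9 elementos."""
--     repetidos = 0
--     contador = [0] * 10  # Cada elemento asume el conteo de los números del 1 al 9
--     for num in lista:
--         if num != 0:
--             contador[num] += 1
--             if contador[num] > 1:
--                 repetidos += 1
--     return repetidos
-- ===== SOURCE B (Python) =====
-- def contarRepetidos(lista):
--     """ Cuenta los números repetidos en una lista de 9 elementos."""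
--     s = sorted(x for x in lista if x != 0)
--     return sum(1 for a, b in zip(s, s[1:]) if a == b)
-- ===== Notes on version B (the rewrite author's own statement) =====
-- stated objective: alternative
-- what changed: Sorts the nonzero values and counts adjacent equal pairs in the sorted run, instead of A's running per-value counter table with a seen-before branch.
-- intended difference: On lists containing a negative element together with its wrapped alias (that element plus ten), A silently wraps the negative index so both values share one counter slot and A over-counts repeats; B counts repeats of the actual values, which is the intended behaviour. — e.g. on contarRepetidos([-1, 9]): A returns 1, B returns 0
import Mathlib
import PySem

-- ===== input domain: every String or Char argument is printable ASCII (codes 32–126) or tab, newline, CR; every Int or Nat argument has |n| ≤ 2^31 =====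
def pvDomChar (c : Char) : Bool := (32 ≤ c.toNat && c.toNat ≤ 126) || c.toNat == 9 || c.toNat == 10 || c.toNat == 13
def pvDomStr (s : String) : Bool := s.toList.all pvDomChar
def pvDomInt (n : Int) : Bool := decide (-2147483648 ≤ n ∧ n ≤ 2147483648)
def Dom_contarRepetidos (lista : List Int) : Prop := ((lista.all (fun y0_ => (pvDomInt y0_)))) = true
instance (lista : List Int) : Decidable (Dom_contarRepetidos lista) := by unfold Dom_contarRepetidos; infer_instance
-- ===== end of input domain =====

-- B sorts the nonzero values and counts adjacent equal pairs, instead of A's running per-slot counter table (objective: alternative).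


-- ===== PORT A =====
def contarRepetidos (lista : List Int) : Int :=
  (lista.foldl (fun st num =>
    if num ≠ 0 then
      let c := PySem.List.pyGetD st.2 num 0 + 1
      let contador := PySem.List.pySetD st.2 num c
      if c > 1 then (st.1 + 1, contador) else (st.1, contador)
    else st) ((0 : Int), List.replicate 10 (0 : Int))).1

-- ===== PORT B =====
def contarRepetidos_alt (lista : List Int) : Int :=
  let s := PySem.List.sorted (lista.filter (fun x => decide (x ≠ 0))) (fun x => x) false
  ((s.zip s.tail).countP (fun p => decide (p.1 = p.2)) : Int)

-- ===== PRECONDITION & SPEC =====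
-- Pre_ excludes exactly the inputs on which A raises IndexError: a nonzero element whose value is not a valid Python index into A's 10-slot table (less than minus ten, or ten and above).
def Pre_contarRepetidos (lista : List Int) : Prop := ∀ x ∈ lista, x ≠ 0 → -10 ≤ x ∧ x < 10
instance (lista : List Int) : Decidable (Pre_contarRepetidos lista) := by unfold Pre_contarRepetidos; infer_instance
def pvWitness_contarRepetidos : List Int := [5, 3, 5, 0, 9, 3, 5]

-- On lists containing a negative element together with its wrapped alias (that element plus ten), A silently
-- wraps the negative index so both values share one counter slot and A over-counts repeats; B counts repeats
-- of the actual values, which is the intended behaviour.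
def D_contarRepetidos (lista : List Int) : Prop := ∃ x ∈ lista, -10 < x ∧ x < 0 ∧ (x + 10) ∈ lista
instance (lista : List Int) : Decidable (D_contarRepetidos lista) := by unfold D_contarRepetidos; infer_instance
def Spec_contarRepetidos (lista : List Int) (out : Int) : Prop := ¬ D_contarRepetidos lista → out = contarRepetidos_alt lista
instance (lista : List Int) (out : Int) : Decidable (Spec_contarRepetidos lista out) := by unfold Spec_contarRepetidos; infer_instance
def pvDiffWitness_contarRepetidos : List Int := [-1, 9]
def pvDiffWitnessOut_contarRepetidos : Int × Int := (1, 0)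

-- ===== CLAIM (what is proved, stated in full; the proofs are below) =====
def Claim_unchanged_contarRepetidos : Prop := ∀ (lista : List Int), Dom_contarRepetidos lista → Pre_contarRepetidos lista → Spec_contarRepetidos lista (contarRepetidos lista)
def Claim_changed_contarRepetidos : Prop := Dom_contarRepetidos (pvDiffWitness_contarRepetidos) ∧ Pre_contarRepetidos (pvDiffWitness_contarRepetidos) ∧ D_contarRepetidos (pvDiffWitness_contarRepetidos) ∧ contarRepetidos (pvDiffWitness_contarRepetidos) = pvDiffWitnessOut_contarRepetidos.1 ∧ contarRepetidos_alt (pvDiffWitness_contarRepetidos) = pvDiffWitnessOut_contarRepetidos.2 ∧ pvDiffWitnessOut_contarRepetidos.1 ≠ pvDiffWitnessOut_contarRepetidos.2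
def Claim_exact_contarRepetidos : Prop := ∀ (lista : List Int), Dom_contarRepetidos lista → Pre_contarRepetidos lista → D_contarRepetidos lista → contarRepetidos lista ≠ contarRepetidos_alt lista

-- ===== LEMMAS AND PROOFS =====

def slotI (x : Int) : Int := if x < 0 then x + 10 else x
def nzOf (l : List Int) : List Int := l.filter (fun x => decide (x ≠ 0))
def contOf (p : List Int) : List Int :=
  (List.range 10).map (fun s => ((nzOf p).countP (fun x => decide (slotI x = (s : Int))) : Int))

theorem slot_lt (i : Int) (h1 : -10 ≤ i) (h2 : i < 10) : (slotI i).toNat < 10 := by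
  simp [slotI]; split_ifs <;> omega

theorem slot_cast (i : Int) (h1 : -10 ≤ i) (h2 : i < 10) : ((slotI i).toNat : Int) = slotI i := by
  simp [slotI]; split_ifs <;> omega

theorem idx_slot (i : Int) (h1 : -10 ≤ i) (h2 : i < 10) :
    PySem.List.pyIdx? 10 i = some (slotI i).toNat := by
  unfold PySem.List.pyIdx? slotI
  split_ifs <;> first | rfl | (exfalso; omega) | (congr 1; omega)

theorem cont_len (p : List Int) : (contOf p).length = 10 := by simp [contOf]

theorem cont_getElem (p : List Int) (j : Nat) (hj : j < 10) :
    (contOf p)[j]'(by rw [cont_len]; omega) = ((nzOf p).countP (fun x => decide (slotI x = (j : Int))) : Int) := by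
  interval_cases j <;> rfl

theorem getD_slot (p : List Int) (i : Int) (h1 : -10 ≤ i) (h2 : i < 10) :
    PySem.List.pyGetD (contOf p) i 0
      = ((nzOf p).countP (fun x => decide (slotI x = slotI i)) : Int) := by
  have hs := slot_lt i h1 h2
  simp only [PySem.List.pyGetD, PySem.List.pyGet?, cont_len, idx_slot i h1 h2, Option.bind_some]
  rw [List.getElem?_eq_getElem (by rw [cont_len]; omega)]
  simp [cont_getElem p _ hs, slot_cast i h1 h2]

theorem setD_slot (p : List Int) (i : Int) (v : Int) (h1 : -10 ≤ i) (h2 : i < 10) :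
    PySem.List.pySetD (contOf p) i v = (contOf p).set (slotI i).toNat v := by
  simp only [PySem.List.pySetD, PySem.List.pySet?, cont_len, idx_slot i h1 h2, Option.map_some, Option.getD_some]

theorem nz_append (p : List Int) (i : Int) (h0 : i ≠ 0) : nzOf (p ++ [i]) = nzOf p ++ [i] := by
  simp [nzOf, List.filter_append, h0]

theorem cont_append (p : List Int) (i : Int) (h1 : -10 ≤ i) (h2 : i < 10) (h0 : i ≠ 0) :
    contOf (p ++ [i]) = (contOf p).set (slotI i).toNat (PySem.List.pyGetD (contOf p) i 0 + 1) := by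
  rw [getD_slot p i h1 h2]
  apply List.ext_getElem (by simp [cont_len])
  intro j hja hjb
  have hj10 : j < 10 := by have := cont_len (p ++ [i]); omega
  rw [cont_getElem _ j hj10, List.getElem_set]
  rw [nz_append p i h0, List.countP_append]
  split_ifs with hji
  · subst hji
    rw [slot_cast i h1 h2]
    simp
  · rw [cont_getElem p j hj10]
    have hne : ¬ (slotI i = (j:Int)) := by
      intro h; apply hji; have := slot_cast i h1 h2; omega
    simp [hne]

def repOf (p : List Int) : Int :=
  ((nzOf p).length : Int) - ((PySem.Set.ofList ((nzOf p).map slotI)).length : Int)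

theorem ofList_append_singleton {α : Type} [BEq α] (l : List α) (x : α) :
    PySem.Set.ofList (l ++ [x]) = PySem.Set.add (PySem.Set.ofList l) x := by
  simp [PySem.Set.ofList_eq_foldl, List.foldl_append]

theorem rep_append (p : List Int) (i : Int) (h1 : -10 ≤ i) (h2 : i < 10) (h0 : i ≠ 0) :
    repOf (p ++ [i]) =
      if PySem.List.pyGetD (contOf p) i 0 + 1 > 1 then repOf p + 1 else repOf p := by
  rw [getD_slot p i h1 h2]
  unfold repOf
  rw [nz_append p i h0, List.map_append, List.map_singleton, ofList_append_singleton]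
  have hmem : slotI i ∈ PySem.Set.ofList ((nzOf p).map slotI)
      ↔ 0 < (nzOf p).countP (fun x => decide (slotI x = slotI i)) := by
    rw [PySem.Set.mem_ofList, List.countP_pos_iff]
    simp [eq_comm]
  unfold PySem.Set.add PySem.Set.contains
  by_cases hc : slotI i ∈ PySem.Set.ofList ((nzOf p).map slotI)
  · have hcnt := hmem.mp hc
    simp only [List.contains_iff_mem, hc, if_pos]
    rw [if_pos (by exact_mod_cast by omega)]
    push_cast [List.length_append]
    simp only [List.length_singleton]
    push_cast
    omega
  · have hcnt : (nzOf p).countP (fun x => decide (slotI x = slotI i)) = 0 := by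
      by_contra h; exact hc (hmem.mpr (by omega))
    simp only [List.contains_iff_mem, hc, if_false]
    rw [if_neg (by rw [hcnt]; norm_num)]
    push_cast [List.length_append]
    simp only [List.length_singleton]
    push_cast
    omega

theorem nz_append_zero (p : List Int) : nzOf (p ++ [0]) = nzOf p := by
  simp [nzOf, List.filter_append]

theorem loopA (l : List Int) : ∀ p : List Int, (∀ x ∈ l, x ≠ 0 → -10 ≤ x ∧ x < 10) →
    l.foldl (fun st num =>
      if num ≠ 0 then
        let c := PySem.List.pyGetD st.2 num 0 + 1
        let contador := PySem.List.pySetD st.2 num c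
        if c > 1 then (st.1 + 1, contador) else (st.1, contador)
      else st) (repOf p, contOf p) = (repOf (p ++ l), contOf (p ++ l)) := by
  induction l with
  | nil => intro p _; simp
  | cons a t ih =>
    intro p hpre
    rw [List.foldl_cons]
    have hstep : (if a ≠ 0 then
        let c := PySem.List.pyGetD (contOf p) a 0 + 1
        let contador := PySem.List.pySetD (contOf p) a c
        if c > 1 then (repOf p + 1, contador) else (repOf p, contador)
      else (repOf p, contOf p)) = (repOf (p ++ [a]), contOf (p ++ [a])) := by
      by_cases ha : a = 0
      · subst ha
        have h1 : repOf (p ++ [0]) = repOf p := by unfold repOf; rw [nz_append_zero]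
        have h2 : contOf (p ++ [0]) = contOf p := by unfold contOf; rw [nz_append_zero]
        simp [h1, h2]
      · have hr := (hpre a (List.mem_cons_self) ha)
        rw [if_pos ha]
        simp only
        rw [setD_slot p a _ hr.1 hr.2, ← cont_append p a hr.1 hr.2 ha,
            rep_append p a hr.1 hr.2 ha]
        split_ifs <;> rfl
    rw [hstep]
    have := ih (p ++ [a]) (fun x hx => hpre x (List.mem_cons_of_mem a hx))
    rw [this, List.append_assoc, List.singleton_append]

theorem A_eq_repOf (l : List Int) (hpre : ∀ x ∈ l, x ≠ 0 → -10 ≤ x ∧ x < 10) :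
    contarRepetidos l = repOf l := by
  unfold contarRepetidos
  have h0 : ((0 : Int), List.replicate 10 (0 : Int)) = (repOf [], contOf []) := by
    rfl
  rw [h0, loopA l [] hpre]
  rfl

theorem len_ofList_card (xs : List Int) : (PySem.Set.ofList xs).length = xs.toFinset.card := by
  have h1 := PySem.Set.nodup_ofList xs
  rw [← List.toFinset_card_of_nodup h1]
  congr 1
  ext a
  simp [PySem.Set.mem_ofList]

theorem repOf_eq (l : List Int) :
    repOf l = ((nzOf l).length : Int) - (((nzOf l).toFinset.image slotI).card : Int) := by
  unfold repOf
  rw [len_ofList_card]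
  have h : (List.map slotI (nzOf l)).toFinset = (nzOf l).toFinset.image slotI := by ext a; simp
  rw [h]

-- ===== B side: adjacent equal pairs in a sorted chain = length - #distinct =====
theorem adj_sorted (s : List Int) (hs : s.Pairwise (· ≤ ·)) :
    (s.zip s.tail).countP (fun p => decide (p.1 = p.2)) + s.toFinset.card = s.length := by
  induction s with
  | nil => simp
  | cons a t ih =>
    cases t with
    | nil => simp
    | cons b u =>
      have htl := hs.tail
      have hab : a ≤ b := (List.pairwise_cons.mp hs).1 b List.mem_cons_self
      have hle : ∀ x ∈ b :: u, a ≤ x := (List.pairwise_cons.mp hs).1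
      have hih := ih htl
      have hzip : ((a :: b :: u).zip (a :: b :: u).tail) = (a, b) :: ((b :: u).zip (b :: u).tail) := by
        simp [List.zip]
      rw [hzip, List.countP_cons]
      by_cases hmem : a ∈ (b :: u).toFinset
      · have hamem : a ∈ b :: u := by simpa using hmem
        have hba : b ≤ a := by
          rcases List.mem_cons.mp hamem with h | h
          · omega
          · exact le_trans ((List.pairwise_cons.mp htl).1 a h) le_rfl
        have hab' : a = b := le_antisymm hab hba
        rw [List.toFinset_cons, Finset.insert_eq_self.mpr hmem]
        simp only [hab', decide_true, if_pos, List.length_cons, List.toFinset_cons] at *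
        omega
      · have hne : a ≠ b := by intro h; exact hmem (by simp [h])
        rw [List.toFinset_cons, Finset.card_insert_of_notMem hmem]
        have hdec : (decide (a = b)) = false := by simp [hne]
        simp only [hdec, Bool.false_eq_true, if_false, List.length_cons, List.toFinset_cons] at *
        omega

theorem alt_eq (l : List Int) :
    contarRepetidos_alt l = ((nzOf l).length : Int) - ((nzOf l).toFinset.card : Int) := by
  unfold contarRepetidos_alt
  have hperm := PySem.List.sorted_perm (nzOf l) (fun x => x) false
  have hpw : (PySem.List.sorted (nzOf l) (fun x => x) false).Pairwise (· ≤ ·) := by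
    simpa using PySem.List.sorted_pairwise (nzOf l) (fun x => x)
  have hadj := adj_sorted _ hpw
  have hlen := hperm.length_eq
  have hfin : (PySem.List.sorted (nzOf l) (fun x => x) false).toFinset = (nzOf l).toFinset :=
    List.toFinset_eq_of_perm _ _ hperm
  show ((((PySem.List.sorted (nzOf l) (fun x => x) false).zip
      (PySem.List.sorted (nzOf l) (fun x => x) false).tail).countP
      (fun p => decide (p.1 = p.2)) : Nat) : Int) = _
  rw [← hfin, ← hlen]
  omega

theorem mem_nz (l : List Int) (x : Int) : x ∈ nzOf l ↔ x ∈ l ∧ x ≠ 0 := by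
  simp [nzOf]

theorem slot_inj (l : List Int) (hpre : ∀ x ∈ l, x ≠ 0 → -10 ≤ x ∧ x < 10)
    (hnd : ¬ D_contarRepetidos l) :
    Set.InjOn slotI ((nzOf l).toFinset : Set Int) := by
  intro a ha b hb hab
  simp only [List.coe_toFinset, Set.mem_setOf_eq] at ha hb
  rw [mem_nz] at ha hb
  have hra := hpre a ha.1 ha.2
  have hrb := hpre b hb.1 hb.2
  by_contra hne
  apply hnd
  unfold slotI at hab
  split_ifs at hab with h1 h2 h2
  · omega
  · exact ⟨a, ha.1, by omega, by omega, by rw [show a + 10 = b by omega]; exact hb.1⟩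
  · exact ⟨b, hb.1, by omega, by omega, by rw [show b + 10 = a by omega]; exact ha.1⟩
  · omega

theorem main_eq (l : List Int) (hpre : ∀ x ∈ l, x ≠ 0 → -10 ≤ x ∧ x < 10)
    (hnd : ¬ D_contarRepetidos l) : contarRepetidos l = contarRepetidos_alt l := by
  rw [A_eq_repOf l hpre, repOf_eq, alt_eq l]
  rw [Finset.card_image_of_injOn (by
    have := slot_inj l hpre hnd
    simpa using this)]

theorem main_ne (l : List Int) (hpre : ∀ x ∈ l, x ≠ 0 → -10 ≤ x ∧ x < 10)
    (hd : D_contarRepetidos l) : contarRepetidos l ≠ contarRepetidos_alt l := by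
  obtain ⟨x, hx, hgt, hlt, hx10⟩ := hd
  rw [A_eq_repOf l hpre, repOf_eq, alt_eq l]
  have hxnz : x ∈ (nzOf l).toFinset := by rw [List.mem_toFinset, mem_nz]; exact ⟨hx, by omega⟩
  have hynz : x + 10 ∈ (nzOf l).toFinset := by rw [List.mem_toFinset, mem_nz]; exact ⟨hx10, by omega⟩
  have hximg : slotI x = slotI (x + 10) := by unfold slotI; split_ifs <;> omega
  have key : ((nzOf l).toFinset).image slotI ⊆ (((nzOf l).toFinset).erase x).image slotI := by
    intro y hy
    rcases Finset.mem_image.mp hy with ⟨c, hc, rfl⟩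
    by_cases hcx : c = x
    · exact Finset.mem_image.mpr ⟨x + 10, Finset.mem_erase.mpr ⟨by omega, hynz⟩, by rw [hcx, hximg]⟩
    · exact Finset.mem_image.mpr ⟨c, Finset.mem_erase.mpr ⟨hcx, hc⟩, rfl⟩
  have h1 : (((nzOf l).toFinset).image slotI).card < ((nzOf l).toFinset).card :=
    lt_of_le_of_lt (le_trans (Finset.card_le_card key) Finset.card_image_le)
      (Finset.card_erase_lt_of_mem hxnz)
  omega

-- ===== VERDICT (by name: the statement is the Claim_ definition above) =====
theorem contarRepetidos_spec : Claim_unchanged_contarRepetidos := by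
  intro lista _ hpre hnd
  exact main_eq lista hpre hnd

theorem contarRepetidos_changed : Claim_changed_contarRepetidos := by
  unfold Claim_changed_contarRepetidos; decide

theorem contarRepetidos_tight : Claim_exact_contarRepetidos := by
  intro lista _ hpre hd
  exact main_ne lista hpre hd
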